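-- pv_equiv track=rewrite | github.com/julianmclain/algorithms-mixtape | algorithms_mixtape/dynamic_programming/sequence_alignment.py | get_penalty
-- ===== SOURCE A (Python) =====
-- def get_penalty(x: str, y: str, gap_penalty: int, mismatch_penalty: int) -> int:
--     penalty = 0
--     for x_char, y_char in zip(x, y):
--         if x_char == "-" or y_char == "-":
--             penalty += gap_penalty
--         elif x_char != y_char:
--             penalty += mismatch_penalty
--
--     return penalty
-- ===== SOURCE B (Python) =====
-- def get_penalty(x: str, y: str, gap_penalty: int, mismatch_penalty: int) -> int:
--     # Aggregate positions into a frequency table of distinct (x_char, y_char) pairs,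
--     # then weight each distinct pair category once by its multiplicity.
--     counts = {}
--     for pair in zip(x, y):
--         counts[pair] = counts.get(pair, 0) + 1
--     total = 0
--     for (a, b), n in counts.items():
--         if a == "-" or b == "-":
--             total += n * gap_penalty
--         elif a != b:
--             total += n * mismatch_penalty
--     return total
-- ===== Notes on version B (the rewrite author's own statement) =====
-- stated objective: alternative
-- what changed: Instead of accumulating a penalty per position, B builds a frequency dictionary mapping each distinct (x_char, y_char) pair to its multiplicity and then adds multiplicity-weighted penalties once per distinct pair category.
import Mathlib
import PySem

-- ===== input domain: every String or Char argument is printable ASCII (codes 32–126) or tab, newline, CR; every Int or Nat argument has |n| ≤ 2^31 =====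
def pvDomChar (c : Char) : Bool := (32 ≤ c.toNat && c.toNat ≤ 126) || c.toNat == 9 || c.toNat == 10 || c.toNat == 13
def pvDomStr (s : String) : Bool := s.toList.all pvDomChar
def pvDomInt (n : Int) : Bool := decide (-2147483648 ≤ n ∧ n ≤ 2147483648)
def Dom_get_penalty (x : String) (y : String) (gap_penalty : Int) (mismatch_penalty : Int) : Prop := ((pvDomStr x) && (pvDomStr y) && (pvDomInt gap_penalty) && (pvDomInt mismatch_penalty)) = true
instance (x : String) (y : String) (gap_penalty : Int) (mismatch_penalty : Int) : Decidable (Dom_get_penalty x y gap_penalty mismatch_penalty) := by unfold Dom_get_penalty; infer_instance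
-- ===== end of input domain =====

-- B aggregates the zipped pairs into a frequency dictionary (distinct pair -> multiplicity) and weights
-- each distinct pair category once, instead of A's per-position accumulation (alternative algorithm, same cost).
-- ===== PORT A =====
def get_penalty (x : String) (y : String) (gap_penalty : Int) (mismatch_penalty : Int) : Int :=
  (List.zip x.toList y.toList).foldl
    (fun penalty p =>
      if p.1 = '-' ∨ p.2 = '-' then penalty + gap_penalty
      else if p.1 ≠ p.2 then penalty + mismatch_penalty
      else penalty) 0

-- ===== PORT B =====
def get_penalty_alt (x : String) (y : String) (gap_penalty : Int) (mismatch_penalty : Int) : Int :=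
  let counts : PySem.Dict (Char × Char) Int :=
    (List.zip x.toList y.toList).foldl
      (fun d p => d.insert p (d.getD p 0 + 1)) PySem.Dict.empty
  counts.items.foldl
    (fun total kn =>
      if kn.1.1 = '-' ∨ kn.1.2 = '-' then total + kn.2 * gap_penalty
      else if kn.1.1 ≠ kn.1.2 then total + kn.2 * mismatch_penalty
      else total) 0

-- ===== PRECONDITION & SPEC =====
def Spec_get_penalty (x : String) (y : String) (gap_penalty : Int) (mismatch_penalty : Int) (out : Int) : Prop := out = get_penalty_alt x y gap_penalty mismatch_penalty
instance (x : String) (y : String) (gap_penalty : Int) (mismatch_penalty : Int) (out : Int) : Decidable (Spec_get_penalty x y gap_penalty mismatch_penalty out) := by unfold Spec_get_penalty; infer_instance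

-- ===== CLAIM =====
def Claim_equal_get_penalty : Prop := ∀ (x : String) (y : String) (gap_penalty : Int) (mismatch_penalty : Int), Dom_get_penalty x y gap_penalty mismatch_penalty → Spec_get_penalty x y gap_penalty mismatch_penalty (get_penalty x y gap_penalty mismatch_penalty)

-- ===== LEMMAS AND PROOFS =====

-- per-position cost A's branch chain computes
def pvCost (g m : Int) (p : Char × Char) : Int :=
  if p.1 = '-' ∨ p.2 = '-' then g else if p.1 ≠ p.2 then m else 0

theorem pv_foldA (g m : Int) (l : List (Char × Char)) (acc : Int) :
    l.foldl (fun penalty p =>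
      if p.1 = '-' ∨ p.2 = '-' then penalty + g
      else if p.1 ≠ p.2 then penalty + m
      else penalty) acc = acc + (l.map (pvCost g m)).sum := by
  induction l generalizing acc with
  | nil => simp
  | cons hd tl ih =>
    rw [List.foldl_cons, ih, List.map_cons, List.sum_cons]
    unfold pvCost
    split_ifs <;> ring

theorem pv_foldB (g m : Int) (l : List ((Char × Char) × Int)) (acc : Int) :
    l.foldl (fun total kn =>
      if kn.1.1 = '-' ∨ kn.1.2 = '-' then total + kn.2 * g
      else if kn.1.1 ≠ kn.1.2 then total + kn.2 * m
      else total) acc = acc + (l.map (fun kn => kn.2 * pvCost g m kn.1)).sum := by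
  induction l generalizing acc with
  | nil => simp
  | cons hd tl ih =>
    rw [List.foldl_cons, ih, List.map_cons, List.sum_cons]
    unfold pvCost
    split_ifs <;> ring

theorem pv_sum_single {α : Type} [DecidableEq α] (w : α → Int) (a : α)
    (d : List α) (hnd : d.Nodup) (ha : a ∈ d) :
    (d.map (fun k => if k = a then w k else 0)).sum = w a := by
  induction d with
  | nil => cases ha
  | cons hd tl ih =>
    rw [List.map_cons, List.sum_cons]
    rcases List.mem_cons.mp ha with h | h
    · have hz : ∀ k ∈ tl, (if k = a then w k else 0) = 0 := by
        intro k hk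
        have : k ≠ a := fun e => (List.nodup_cons.mp hnd).1 (h ▸ e ▸ hk)
        simp [this]
      rw [if_pos h.symm, List.sum_eq_zero, ← h]
      · ring
      · intro z hz2
        rcases List.mem_map.mp hz2 with ⟨k, hk, rfl⟩
        exact hz k hk
    · have hne : hd ≠ a := fun e => (List.nodup_cons.mp hnd).1 (e ▸ h)
      rw [if_neg hne, ih (List.nodup_cons.mp hnd).2 h]
      ring

theorem pv_sum_counts {α : Type} [BEq α] [LawfulBEq α] [DecidableEq α] (w : α → Int) (l d : List α)
    (hnd : d.Nodup) (hsub : ∀ a ∈ l, a ∈ d) :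
    (d.map (fun k => (l.count k : Int) * w k)).sum = (l.map w).sum := by
  induction l with
  | nil => simp
  | cons a tl ih =>
    have hsub' : ∀ b ∈ tl, b ∈ d := fun b hb => hsub b (List.mem_cons_of_mem _ hb)
    have key : ∀ k, ((List.count k (a :: tl) : Int) * w k)
        = ((tl.count k : Int) * w k) + (if k = a then w k else 0) := by
      intro k
      rw [List.count_cons]
      by_cases h : k = a
      · subst h; simp; ring
      · simp [h]
        exact Or.inl fun e => h e.symm
    calc (d.map (fun k => ((a :: tl).count k : Int) * w k)).sum
        = (d.map (fun k => ((tl.count k : Int) * w k) + (if k = a then w k else 0))).sum := by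
          congr 1; exact List.map_congr_left (fun k _ => key k)
      _ = (d.map (fun k => (tl.count k : Int) * w k)).sum
            + (d.map (fun k => if k = a then w k else 0)).sum := by
          rw [← List.sum_map_add]
      _ = (tl.map w).sum + w a := by
          rw [ih hsub', pv_sum_single w a d hnd (hsub a List.mem_cons_self)]
      _ = ((a :: tl).map w).sum := by rw [List.map_cons, List.sum_cons]; ring

-- ===== VERDICT =====
theorem get_penalty_spec : Claim_equal_get_penalty := by
  intro x y g m _
  unfold Spec_get_penalty get_penalty get_penalty_alt
  set l := List.zip x.toList y.toList with hl
  rw [pv_foldA]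
  rw [show (l.foldl (fun d p => d.insert p (d.getD p 0 + 1)) PySem.Dict.empty)
        = PySem.Dict.counter l from PySem.Dict.foldl_insert_getD_add_one_eq_counter l]
  rw [pv_foldB, PySem.Dict.items_counter]
  rw [List.map_map]
  have := pv_sum_counts (pvCost g m) l (PySem.Set.ofList l)
    (PySem.Set.nodup_ofList l) (fun a ha => (PySem.Set.mem_ofList l a).mpr ha)
  simpa [Function.comp_def] using this.symm
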